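-- pv_equiv track=rewrite | github.com/Nithin8919/AI_policy_assistant_demo | pipeline/utils/dataset_registry.py | _identify_bridge_fields
-- ===== SOURCE A (Python) =====
-- from typing import Dict, List, Optional, Any
--
-- def _identify_bridge_fields(key_fields: Dict[str, str]) -> List[str]:
--     """Identify fields that can bridge to other datasets"""
--     bridge_patterns = {
--         'school_code', 'udise_code', 'school_id',
--         'district', 'mandal', 'division',
--         'go_number', 'policy_id', 'circular_id',
--         'department', 'office', 'institution_id',
--         'date', 'year', 'academic_year'
--     }
--
--     bridge_fields = []
--     for field in key_fields.keys():
--         if any(pattern in field.lower() for pattern in bridge_patterns):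
--             bridge_fields.append(field)
--
--     return bridge_fields
-- ===== SOURCE B (Python) =====
-- _BRIDGE_PATTERNS = frozenset({
--     'school_code', 'udise_code', 'school_id',
--     'district', 'mandal', 'division',
--     'go_number', 'policy_id', 'circular_id',
--     'department', 'office', 'institution_id',
--     'date', 'year', 'academic_year'
-- })
-- _BRIDGE_LENGTHS = sorted({len(p) for p in _BRIDGE_PATTERNS})
--
--
-- def _identify_bridge_fields(key_fields):
--     """Identify fields that can bridge to other datasets"""
--     bridge_fields = []
--     for field in key_fields.keys():
--         low = field.lower()
--         n = len(low)
--         # slide a window of each pattern length over the field and hash-probe it,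
--         # instead of running a substring search per pattern
--         if any(low[i:i + L] in _BRIDGE_PATTERNS
--                for i in range(n) for L in _BRIDGE_LENGTHS):
--             bridge_fields.append(field)
--     return bridge_fields
-- ===== Notes on version B (the rewrite author's own statement) =====
-- stated objective: alternative
-- what changed: B inverts the matching: instead of running a substring search per pattern (A's any(pattern in field.lower() ...)), it slides a window of each distinct pattern length over the lowered field and probes the substring in a precomputed frozenset, so the per-pattern scan is replaced by hash lookups of field windows.
import Mathlib
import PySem

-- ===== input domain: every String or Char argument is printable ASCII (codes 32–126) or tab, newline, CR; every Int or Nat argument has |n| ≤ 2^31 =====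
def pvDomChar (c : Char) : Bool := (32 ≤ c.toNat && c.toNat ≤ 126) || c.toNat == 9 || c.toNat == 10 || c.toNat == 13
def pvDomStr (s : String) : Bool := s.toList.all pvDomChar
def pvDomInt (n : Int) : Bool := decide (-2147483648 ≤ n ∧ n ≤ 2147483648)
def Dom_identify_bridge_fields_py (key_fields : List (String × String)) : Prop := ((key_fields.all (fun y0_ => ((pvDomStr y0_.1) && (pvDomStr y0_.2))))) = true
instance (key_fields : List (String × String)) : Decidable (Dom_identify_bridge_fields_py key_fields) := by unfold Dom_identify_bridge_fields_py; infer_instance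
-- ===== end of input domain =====

-- B slides a window of each pattern length over the field and hash-probes the pattern set,
-- instead of A's substring search per pattern (alternative algorithm, same cost class).

-- ===== PORT A =====
-- the bridge_patterns set literal, in source order
def pvBridgePatternsA : List String :=
  ["school_code", "udise_code", "school_id",
   "district", "mandal", "division",
   "go_number", "policy_id", "circular_id",
   "department", "office", "institution_id",
   "date", "year", "academic_year"]

def identify_bridge_fields_py (key_fields : List (String × String)) : List String :=
  key_fields.foldl
    (fun bridge_fields kv =>
      if pvBridgePatternsA.any (fun pattern => PySem.Str.isIn pattern (PySem.Str.lower kv.1)) then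
        bridge_fields ++ [kv.1]
      else bridge_fields) []

-- ===== PORT B =====
-- _BRIDGE_PATTERNS (the frozenset, held as the list of its distinct elements)
def pvBridgePatternsB : List (List Char) :=
  ["school_code".toList, "udise_code".toList, "school_id".toList,
   "district".toList, "mandal".toList, "division".toList,
   "go_number".toList, "policy_id".toList, "circular_id".toList,
   "department".toList, "office".toList, "institution_id".toList,
   "date".toList, "year".toList, "academic_year".toList]

-- _BRIDGE_LENGTHS = sorted({len(p) for p in _BRIDGE_PATTERNS})
def pvBridgeLengths : List Nat := [4, 6, 8, 9, 10, 11, 13, 14]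

-- the any(...) generator: for i in range(n) for L in _BRIDGE_LENGTHS, low[i:i+L] in _BRIDGE_PATTERNS
def pvWindowMatch (low : List Char) : Bool :=
  (List.range low.length).any (fun i =>
    pvBridgeLengths.any (fun L =>
      pvBridgePatternsB.contains
        (PySem.List.slice low (some (i : Int)) (some ((i : Int) + (L : Int))))))

def identify_bridge_fields_py_alt (key_fields : List (String × String)) : List String :=
  key_fields.foldl
    (fun bridge_fields kv =>
      if pvWindowMatch (PySem.Str.lower kv.1).toList then
        bridge_fields ++ [kv.1]
      else bridge_fields) []

-- ===== PRECONDITION & SPEC =====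
def Spec_identify_bridge_fields_py (key_fields : List (String × String)) (out : List String) : Prop := out = identify_bridge_fields_py_alt key_fields
instance (key_fields : List (String × String)) (out : List String) : Decidable (Spec_identify_bridge_fields_py key_fields out) := by unfold Spec_identify_bridge_fields_py; infer_instance

-- ===== CLAIM (what is proved, stated in full; the proofs are below) =====
def Claim_equal_identify_bridge_fields_py : Prop := ∀ (key_fields : List (String × String)), Dom_identify_bridge_fields_py key_fields → Spec_identify_bridge_fields_py key_fields (identify_bridge_fields_py key_fields)

-- ===== LEMMAS AND PROOFS =====

-- every A-pattern is nonempty, is in B's set, and its length is in the length list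
theorem pvPatternsA_facts : ∀ p ∈ pvBridgePatternsA,
    p.toList ≠ [] ∧ p.toList ∈ pvBridgePatternsB ∧ p.toList.length ∈ pvBridgeLengths := by
  decide

-- every element of B's set is the char list of some A-pattern
theorem pvPatternsB_facts : ∀ q ∈ pvBridgePatternsB, ∃ p ∈ pvBridgePatternsA, p.toList = q := by
  decide

-- the two per-field conditions agree
theorem pvCond_eq (s : String) :
    pvBridgePatternsA.any (fun pattern => PySem.Str.isIn pattern (PySem.Str.lower s))
      = pvWindowMatch (PySem.Str.lower s).toList := by
  set l : List Char := (PySem.Str.lower s).toList with hl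
  rw [Bool.eq_iff_iff]
  constructor
  · intro h
    obtain ⟨p, hpA, hin⟩ := List.any_eq_true.mp h
    obtain ⟨hne, hpB, hlen⟩ := pvPatternsA_facts p hpA
    rw [PySem.Str.isIn_iff_infix] at hin
    obtain ⟨pre, suf, hps⟩ := hin
    refine List.any_eq_true.mpr ⟨pre.length, List.mem_range.mpr ?_, ?_⟩
    · have : l.length = pre.length + p.toList.length + suf.length := by
        rw [hl, ← hps]; simp [List.length_append]; omega
      have hp0 : 0 < p.toList.length := List.length_pos_iff.mpr hne
      omega
    · refine List.any_eq_true.mpr ⟨p.toList.length, hlen, ?_⟩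
      rw [PySem.List.slice_natCast_add]
      have hdrop : l.drop pre.length = p.toList ++ suf := by
        rw [hl, ← hps, List.append_assoc, List.drop_left]
      rw [hdrop, List.take_left]
      exact List.contains_iff_mem.mpr hpB
  · intro h
    obtain ⟨i, _, hrest⟩ := List.any_eq_true.mp h
    obtain ⟨L, _, hc⟩ := List.any_eq_true.mp hrest
    rw [PySem.List.slice_natCast_add] at hc
    have hqB : (l.drop i).take L ∈ pvBridgePatternsB := List.contains_iff_mem.mp hc
    obtain ⟨p, hpA, hpq⟩ := pvPatternsB_facts _ hqB
    refine List.any_eq_true.mpr ⟨p, hpA, ?_⟩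
    rw [PySem.Str.isIn_iff_infix, hpq]
    exact ((List.take_prefix _ _).isInfix).trans ((List.drop_suffix _ _).isInfix)

-- ===== VERDICT (by name: the statement is the Claim_ definition above) =====
theorem identify_bridge_fields_py_spec : Claim_equal_identify_bridge_fields_py := by
  intro key_fields _
  unfold Spec_identify_bridge_fields_py identify_bridge_fields_py identify_bridge_fields_py_alt
  simp only [pvCond_eq]
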